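-- pv_equiv track=rewrite | github.com/dominiquecuevas/cracking-the-coding-interview | big-o.py | foo
-- ===== SOURCE A (Python) =====
-- def foo(nums):
--     """
--     O(n)
--     ignore the 2 in O(2n) since it is constant
--     """
--     summed = 0
--     product = 1
--     for idx in range(len(nums)):
--         summed += nums[idx]
--     for idx in range(len(nums)):
--         product *= nums[idx]
--     return f"{summed}, {product}"
-- ===== SOURCE B (Python) =====
-- def foo(nums):
--     summed = 0
--     product = 1
--     for x in nums:
--         summed += x
--         product *= x
--     return f"{summed}, {product}"
-- ===== Notes on version B (the rewrite author's own statement) =====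
-- stated objective: simpler
-- what changed: The two sequential index-based loops over range(len(nums)) are fused into one direct iteration over the elements that maintains both accumulators in a single pass.
import Mathlib
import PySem

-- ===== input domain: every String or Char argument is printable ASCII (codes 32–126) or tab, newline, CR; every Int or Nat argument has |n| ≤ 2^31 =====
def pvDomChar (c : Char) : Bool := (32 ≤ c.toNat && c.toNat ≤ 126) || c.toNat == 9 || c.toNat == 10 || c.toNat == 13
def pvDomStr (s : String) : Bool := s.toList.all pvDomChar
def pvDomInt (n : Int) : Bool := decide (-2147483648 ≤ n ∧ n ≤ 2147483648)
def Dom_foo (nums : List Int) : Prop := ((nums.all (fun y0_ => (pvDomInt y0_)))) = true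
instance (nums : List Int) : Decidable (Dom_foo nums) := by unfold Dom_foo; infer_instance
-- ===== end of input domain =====

-- B fuses A's two index-based loops into one direct pass over the elements (simpler, same result).

-- ===== PORT A =====
-- two loops over range(len(nums)), each indexing nums[idx]
def foo (nums : List Int) : String :=
  let summed : Int :=
    (PySem.List.pyRange 0 (nums.length : Int) 1).foldl
      (fun acc idx => acc + PySem.List.pyGetD nums idx 0) 0
  let product : Int :=
    (PySem.List.pyRange 0 (nums.length : Int) 1).foldl
      (fun acc idx => acc * PySem.List.pyGetD nums idx 0) 1
  PySem.Int.toStr summed ++ ", " ++ PySem.Int.toStr product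

-- ===== PORT B =====
-- single loop over the elements, maintaining both accumulators
def foo_alt (nums : List Int) : String :=
  let sp : Int × Int :=
    nums.foldl (fun acc x => (acc.1 + x, acc.2 * x)) (0, 1)
  PySem.Int.toStr sp.1 ++ ", " ++ PySem.Int.toStr sp.2

-- ===== PRECONDITION & SPEC =====
def Spec_foo (nums : List Int) (out : String) : Prop := out = foo_alt nums
instance (nums : List Int) (out : String) : Decidable (Spec_foo nums out) := by unfold Spec_foo; infer_instance

-- ===== CLAIM =====
def Claim_equal_foo : Prop := ∀ (nums : List Int), Dom_foo nums → Spec_foo nums (foo nums)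

-- ===== LEMMAS AND PROOFS =====
theorem foo_pair (nums : List Int) (s p : Int) :
    nums.foldl (fun acc x => (acc.1 + x, acc.2 * x)) (s, p)
      = (nums.foldl (· + ·) s, nums.foldl (· * ·) p) := by
  induction nums generalizing s p with
  | nil => rfl
  | cons x xs ih => simpa using ih (s + x) (p * x)

-- ===== VERDICT =====
theorem foo_spec : Claim_equal_foo := by
  intro nums _
  unfold Spec_foo foo foo_alt
  rw [PySem.List.foldl_pyRange_zero_pyGetD' nums 0 (· + ·) 0,
      PySem.List.foldl_pyRange_zero_pyGetD' nums 0 (· * ·) 1,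
      foo_pair]
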